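-- pv_equiv track=rewrite | github.com/jsnider3/StudyNotes | GoogleCodeJam2018/CodeJamStudyJam/PracticeProblems/ovation.py | solve
-- ===== SOURCE A (Python) =====
-- def solve(test_case):
-- 	additions = 0
-- 	standing = 0
-- 	for ind in range(len(test_case)):
-- 		if standing <= ind:
-- 			additions += ind - standing
-- 			standing = ind
-- 		standing += test_case[ind]
-- 	return additions
-- ===== SOURCE B (Python) =====
-- def solve(test_case):
--     # Right-to-left suffix recurrence: the answer for x::t is max(0, 1 - x + answer(t)).
--     best = None  # answer for the (initially empty) suffix already processed
--     for x in reversed(test_case):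
--         best = 0 if best is None else max(0, 1 - x + best)
--     return 0 if best is None else best
-- ===== Notes on version B (the rewrite author's own statement) =====
-- stated objective: alternative
-- what changed: Replaces A's forward index loop that patches a 'standing' counter and accumulates 'additions' with a backward (right-to-left) pass using the suffix recurrence answer(x::t) = max(0, 1 - x + answer(t)); no index variable, no prefix sum, no running counter.
import Mathlib
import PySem

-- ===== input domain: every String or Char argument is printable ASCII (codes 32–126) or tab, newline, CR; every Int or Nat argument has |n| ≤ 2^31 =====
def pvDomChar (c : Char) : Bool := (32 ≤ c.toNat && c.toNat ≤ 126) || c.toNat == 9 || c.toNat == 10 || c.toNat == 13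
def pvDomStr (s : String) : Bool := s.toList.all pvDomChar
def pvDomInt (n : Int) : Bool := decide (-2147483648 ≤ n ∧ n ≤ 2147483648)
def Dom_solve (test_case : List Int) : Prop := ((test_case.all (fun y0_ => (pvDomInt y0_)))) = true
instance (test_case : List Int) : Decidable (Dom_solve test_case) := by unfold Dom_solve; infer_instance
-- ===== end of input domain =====

-- B replaces A's forward index loop with 'standing'/'additions' counters by a backward
-- (right-to-left) pass using the suffix recurrence answer(x::t) = max(0, 1 - x + answer(t));
-- alternative decomposition, same O(n) cost.

-- ===== PORT A =====
-- for ind in range(len(test_case)): if standing <= ind: additions += ind - standing; standing = ind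
--                                   standing += test_case[ind]
def solve (test_case : List Int) : Int :=
  ((PySem.List.pyRange 0 test_case.length 1).foldl
    (fun (s : Int × Int) ind =>
      let s' := if s.2 ≤ ind then (s.1 + (ind - s.2), ind) else s
      (s'.1, s'.2 + PySem.List.pyGetD test_case ind 0))
    ((0 : Int), (0 : Int))).1

-- ===== PORT B =====
-- best = None; for x in reversed(test_case): best = 0 if best is None else max(0, 1 - x + best)
-- return 0 if best is None else best
def solve_alt (test_case : List Int) : Int :=
  let best := test_case.reverse.foldl
    (fun (best : Option Int) x =>
      match best with
      | none => some 0
      | some b => some (max 0 (1 - x + b)))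
    none
  match best with
  | none => 0
  | some b => b

-- ===== PRECONDITION & SPEC =====
def Spec_solve (test_case : List Int) (out : Int) : Prop := out = solve_alt test_case
instance (test_case : List Int) (out : Int) : Decidable (Spec_solve test_case out) := by unfold Spec_solve; infer_instance

-- ===== CLAIM (what is proved, stated in full; the proofs are below) =====
def Claim_equal_solve : Prop := ∀ (test_case : List Int), Dom_solve test_case → Spec_solve test_case (solve test_case)

-- ===== LEMMAS AND PROOFS =====

-- B's reversed foldl, written as the equivalent foldr over the original list.
def pvBr (l : List Int) : Option Int :=
  l.foldr
    (fun x best =>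
      match best with
      | none => some 0
      | some b => some (max 0 (1 - x + b)))
    none

theorem pvBr_nonneg : ∀ (l : List Int) (b : Int), pvBr l = some b → 0 ≤ b := by
  intro l b h
  cases l with
  | nil => simp [pvBr] at h
  | cons x t =>
    simp only [pvBr, List.foldr_cons] at h
    cases ht : (t.foldr (fun x best => match best with
        | none => some 0
        | some b => some (max 0 (1 - x + b))) none) with
    | none => rw [ht] at h; injection h with h'; omega
    | some b' => rw [ht] at h; injection h with h'; omega

-- Invariant: A's state is (a, p + a) exactly when the max-deficit state is (a, p);
-- preserved by one loop step for an arbitrary index value.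
theorem pv_key (g : Int → Int) : ∀ (l : List Int) (a p : Int),
    l.foldl
      (fun (s : Int × Int) ind =>
        let s' := if s.2 ≤ ind then (s.1 + (ind - s.2), ind) else s
        (s'.1, s'.2 + g ind)) (a, p + a)
    = (fun r : Int × Int => (r.1, r.2 + r.1))
        (l.foldl (fun (s : Int × Int) ind => (max s.1 (ind - s.2), s.2 + g ind)) (a, p)) := by
  intro l
  induction l with
  | nil => intro a p; rfl
  | cons ind t ih =>
    intro a p
    simp only [List.foldl_cons]
    by_cases h : p + a ≤ ind
    · have hmax : max a (ind - p) = ind - p := by omega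
      rw [if_pos (by omega : p + a ≤ ind)]
      simp only [hmax]
      calc t.foldl _ ((a + (ind - (p + a)), ind).1, (a + (ind - (p + a)), ind).2 + g ind)
          = t.foldl
              (fun (s : Int × Int) ind =>
                let s' := if s.2 ≤ ind then (s.1 + (ind - s.2), ind) else s
                (s'.1, s'.2 + g ind)) (ind - p, (p + g ind) + (ind - p)) := by
            congr 1; simp; constructor <;> ring
        _ = _ := by rw [ih (ind - p) (p + g ind)]
    · have hmax : max a (ind - p) = a := by omega
      rw [if_neg (by omega : ¬ (p + a ≤ ind))]
      simp only [hmax]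
      calc t.foldl _ ((a, p + a).1, (a, p + a).2 + g ind)
          = t.foldl
              (fun (s : Int × Int) ind =>
                let s' := if s.2 ≤ ind then (s.1 + (ind - s.2), ind) else s
                (s'.1, s'.2 + g ind)) (a, (p + g ind) + a) := by
            congr 1; simp; ring
        _ = _ := by rw [ih a (p + g ind)]

-- The max-prefix-deficit fold over enumerate equals the suffix recurrence pvBr.
theorem pv_suffix : ∀ (l : List Int) (k d p : Int),
    ((PySem.List.enumerate l k).foldl
      (fun (s : Int × Int) q => (max s.1 (q.1 - s.2), s.2 + q.2)) (d, p)).1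
    = match pvBr l with
      | none => d
      | some b => max d ((k - p) + b) := by
  intro l
  induction l with
  | nil => intro k d p; simp [PySem.List.enumerate_nil, pvBr]
  | cons x t ih =>
    intro k d p
    rw [PySem.List.enumerate_cons]
    simp only [List.foldl_cons]
    rw [ih (k + 1) (max d (k - p)) (p + x)]
    simp only [pvBr, List.foldr_cons]
    cases ht : (t.foldr (fun x best => match best with
        | none => some 0
        | some b => some (max 0 (1 - x + b))) none) with
    | none => dsimp only; rw [add_zero]
    | some b =>
      dsimp only
      have e1 : (k - p) + (0 : Int) = k - p := by ring
      have e2 : (k - p) + (1 - x + b) = k + 1 - (p + x) + b := by ring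
      rw [← max_add_add_left, e1, e2, max_assoc]

-- ===== VERDICT (by name: the statement is the Claim_ definition above) =====
theorem solve_spec : Claim_equal_solve := by
  intro tc _
  unfold Spec_solve solve solve_alt
  have h := pv_key (fun ind => PySem.List.pyGetD tc ind 0)
      (PySem.List.pyRange 0 tc.length 1) 0 0
  simp only [add_zero] at h
  rw [h]
  have he : (PySem.List.enumerate tc 0).foldl
      (fun (s : Int × Int) q => (max s.1 (q.1 - s.2), s.2 + q.2)) ((0 : Int), (0 : Int))
      = (PySem.List.pyRange 0 tc.length 1).foldl
      (fun (s : Int × Int) ind => (max s.1 (ind - s.2), s.2 + PySem.List.pyGetD tc ind 0)) ((0 : Int), (0 : Int)) := by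
    rw [PySem.List.enumerate_eq_map_pyRange tc 0, List.foldl_map]
    simp [PySem.List.len]
  rw [← he, pv_suffix tc 0 0 0]
  rw [List.foldl_reverse]
  show (match pvBr tc with | none => (0 : Int) | some b => max 0 ((0 - 0) + b))
      = (match pvBr tc with | none => (0 : Int) | some b => b)
  cases hb : pvBr tc with
  | none => rfl
  | some b =>
    have hnn := pvBr_nonneg tc b hb
    have e : (0 : Int) - 0 + b = b := by ring
    dsimp only
    rw [e]
    exact max_eq_right hnn
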